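-- pv_equiv track=rewrite | github.com/lagomoura/criticomida-backend | scripts/safe_migrate.py | _libpq_url
-- ===== SOURCE A (Python) =====
-- def _libpq_url(url: str) -> str:
--     """Strip SQLAlchemy driver prefix; asyncpg uses libpq-style URLs."""
--     for prefix in (
--         "postgresql+asyncpg://",
--         "postgresql+psycopg2://",
--         "postgresql+psycopg://",
--     ):
--         if url.startswith(prefix):
--             return "postgresql://" + url[len(prefix):]
--     if url.startswith("postgres://"):
--         return "postgresql://" + url[len("postgres://"):]
--     return url
-- ===== SOURCE B (Python) =====
-- def _libpq_url(url: str) -> str: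
--     """Strip SQLAlchemy driver prefix; asyncpg uses libpq-style URLs."""
--     head, sep, rest = url.partition("://")
--     if sep and head in ("postgresql+asyncpg", "postgresql+psycopg2",
--                         "postgresql+psycopg", "postgres"):
--         return "postgresql://" + rest
--     return url
-- ===== Notes on version B (the rewrite author's own statement) =====
-- stated objective: idiomatic
-- what changed: B splits the URL once at the first scheme separator with str.partition and tests the scheme name against a four-element tuple, instead of A's loop of startswith checks over full driver prefixes plus a separate plain-postgres branch.
import Mathlib
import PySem

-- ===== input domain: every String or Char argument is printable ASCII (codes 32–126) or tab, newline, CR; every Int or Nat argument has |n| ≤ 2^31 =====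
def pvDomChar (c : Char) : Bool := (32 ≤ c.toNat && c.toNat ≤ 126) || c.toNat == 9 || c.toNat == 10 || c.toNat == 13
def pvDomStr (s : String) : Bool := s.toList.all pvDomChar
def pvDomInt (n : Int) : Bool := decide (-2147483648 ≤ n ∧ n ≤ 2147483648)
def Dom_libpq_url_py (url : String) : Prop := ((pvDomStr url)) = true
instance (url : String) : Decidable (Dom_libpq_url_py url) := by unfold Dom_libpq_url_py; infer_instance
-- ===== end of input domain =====

-- B replaces A's loop of full-prefix startswith checks by one split at the first "://"
-- (str.partition, ported here via find) and a scheme-name membership test; same cost, more idiomatic.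

-- ===== PORT A =====
def libpq_url_py (url : String) : String :=
  if PySem.Str.startswith url "postgresql+asyncpg://" then
    "postgresql://" ++ PySem.Str.slice url (some 21) none
  else if PySem.Str.startswith url "postgresql+psycopg2://" then
    "postgresql://" ++ PySem.Str.slice url (some 22) none
  else if PySem.Str.startswith url "postgresql+psycopg://" then
    "postgresql://" ++ PySem.Str.slice url (some 21) none
  else if PySem.Str.startswith url "postgres://" then
    "postgresql://" ++ PySem.Str.slice url (some 11) none
  else url

-- ===== PORT B =====
-- str.partition("://") ported by hand via Str.find (exact: first occurrence, or no split when absent)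
def libpq_url_py_alt (url : String) : String :=
  let i := PySem.Str.find url "://"
  if i = -1 then url            -- sep == "" : no "://" in url
  else
    let head := PySem.Str.slice url none (some i)
    let rest := PySem.Str.slice url (some (i + 3)) none
    if head = "postgresql+asyncpg" ∨ head = "postgresql+psycopg2" ∨
       head = "postgresql+psycopg" ∨ head = "postgres" then
      "postgresql://" ++ rest
    else url

-- ===== PRECONDITION & SPEC =====
def Spec_libpq_url_py (url : String) (out : String) : Prop := out = libpq_url_py_alt url
instance (url : String) (out : String) : Decidable (Spec_libpq_url_py url out) := by unfold Spec_libpq_url_py; infer_instance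

-- ===== CLAIM (what is proved, stated in full; the proofs are below) =====
def Claim_equal_libpq_url_py : Prop := ∀ (url : String), Dom_libpq_url_py url → Spec_libpq_url_py url (libpq_url_py url)

-- ===== LEMMAS AND PROOFS =====

-- the separator "://" as a char list
def pvSep : List Char := [':', '/', '/']

-- an occurrence of the separator at n decomposes s
theorem pv_occ_decomp (s : List Char) (n : Nat) (h : pvSep <+: s.drop n) :
    s = s.take n ++ pvSep ++ s.drop (n + 3) := by
  obtain ⟨u, hu⟩ := h
  have hdrop : s.drop (n + 3) = u := by
    have : List.drop 3 (s.drop n) = u := by rw [← hu]; rfl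
    simpa [List.drop_drop, Nat.add_comm] using this
  calc s = s.take n ++ s.drop n := (List.take_append_drop n s).symm
    _ = s.take n ++ pvSep ++ s.drop (n + 3) := by rw [← hu, hdrop, List.append_assoc]

-- an occurrence of the separator at i puts ':' at index i
theorem pv_colon_at (s : List Char) (i : Nat) (h : pvSep <+: s.drop i) : s[i]? = some ':' := by
  obtain ⟨u, hu⟩ := h
  have h0 : (s.drop i)[0]? = some ':' := by rw [← hu]; rfl
  simpa using h0

-- if s starts with p ++ "://" and p is colon-free, find locates the separator at p.length
theorem pv_find_of_prefix (s p : List Char) (hp : ':' ∉ p) (h : (p ++ pvSep) <+: s) :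
    PySem.Chars.find s pvSep = (p.length : Int) := by
  obtain ⟨t, ht⟩ := h
  have hocc_p : pvSep <+: s.drop p.length := by
    rw [← ht, List.append_assoc, List.drop_left]
    exact ⟨t, rfl⟩
  have hnn : 0 ≤ PySem.Chars.find s pvSep := by
    rw [PySem.Chars.find_nonneg_iff]
    exact ⟨s.take p.length, s.drop (p.length + 3), (pv_occ_decomp s p.length hocc_p).symm⟩
  obtain ⟨hocc, hmin⟩ := PySem.Chars.find_spec hnn
  set m := (PySem.Chars.find s pvSep).toNat with hm
  have hle : m ≤ p.length := by
    by_contra hgt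
    exact hmin p.length (by omega) hocc_p
  have hge : p.length ≤ m := by
    by_contra hlt'
    have hlt : m < p.length := by omega
    have hcol : s[m]? = some ':' := pv_colon_at s m hocc
    have : s[m]? = p[m]? := by
      rw [← ht, List.append_assoc]
      exact List.getElem?_append_left (by simpa using hlt)
    rw [this] at hcol
    exact hp (List.mem_of_getElem? hcol)
  have : m = p.length := le_antisymm hle hge
  omega

-- from an occurrence at m with matching head, recover the full-prefix fact
theorem pv_prefix_of_head (s p : List Char) (m : Nat)
    (hocc : pvSep <+: s.drop m) (hhead : s.take m = p) : (p ++ pvSep) <+: s := by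
  refine ⟨s.drop (m + 3), ?_⟩
  rw [← hhead]
  exact (pv_occ_decomp s m hocc).symm

-- ===== VERDICT (by name: the statement is the Claim_ definition above) =====
theorem libpq_url_py_spec : Claim_equal_libpq_url_py := by
  intro url _
  unfold Spec_libpq_url_py libpq_url_py libpq_url_py_alt
  have hfind : PySem.Str.find url "://" = PySem.Chars.find url.toList pvSep := by
    rw [PySem.Str.find_eq]; rfl
  -- helper: handle one matching scheme p (n is p's length as a literal)
  have main : ∀ (p : String) (n : Int), ':' ∉ p.toList → (p.toList.length : Int) = n →
      PySem.Str.startswith url (p ++ "://") = true →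
      PySem.Str.find url "://" = n ∧ PySem.Str.slice url none (some n) = p := by
    intro p n hp hn hsw
    have hpre : (p.toList ++ pvSep) <+: url.toList := by
      rw [PySem.Str.startswith_eq, PySem.Chars.startswith_iff] at hsw
      simpa using hsw
    have hf : PySem.Str.find url "://" = n := by
      rw [hfind, pv_find_of_prefix _ _ hp hpre, hn]
    refine ⟨hf, ?_⟩
    apply String.toList_inj.mp
    rw [PySem.Str.toList_slice, PySem.Chars.slice_eq_listSlice,
        PySem.List.slice_to _ (by rw [← hn]; positivity)]
    rw [← hn, Int.toNat_natCast]
    exact (List.prefix_iff_eq_take.mp ((List.prefix_append _ _).trans hpre)).symm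
  by_cases h1 : PySem.Str.startswith url "postgresql+asyncpg://" = true
  · obtain ⟨hf, hh⟩ := main "postgresql+asyncpg" 18 (by decide) (by decide) h1
    rw [if_pos h1, hf, if_neg (by norm_num), if_pos (Or.inl hh)]
    norm_num
  · rw [if_neg h1]
    by_cases h2 : PySem.Str.startswith url "postgresql+psycopg2://" = true
    · obtain ⟨hf, hh⟩ := main "postgresql+psycopg2" 19 (by decide) (by decide) h2
      rw [if_pos h2, hf, if_neg (by norm_num), if_pos (Or.inr (Or.inl hh))]
      norm_num
    · rw [if_neg h2]
      by_cases h3 : PySem.Str.startswith url "postgresql+psycopg://" = true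
      · obtain ⟨hf, hh⟩ := main "postgresql+psycopg" 18 (by decide) (by decide) h3
        rw [if_pos h3, hf, if_neg (by norm_num), if_pos (Or.inr (Or.inr (Or.inl hh)))]
        norm_num
      · rw [if_neg h3]
        by_cases h4 : PySem.Str.startswith url "postgres://" = true
        · obtain ⟨hf, hh⟩ := main "postgres" 8 (by decide) (by decide) h4
          rw [if_pos h4, hf, if_neg (by norm_num), if_pos (Or.inr (Or.inr (Or.inr hh)))]
          norm_num
        · rw [if_neg h4]
          -- no scheme matches: B must return url as well
          by_cases hneg : PySem.Str.find url "://" = -1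
          · rw [if_pos hneg]
          · rw [if_neg hneg]
            have hnn : 0 ≤ PySem.Str.find url "://" := by
              have := PySem.Chars.neg_one_le_find url.toList pvSep
              rw [hfind]; rw [hfind] at hneg; omega
            obtain ⟨hocc, _⟩ := PySem.Chars.find_spec (by rw [← hfind]; exact hnn)
            rw [← hfind] at hocc
            have hheadlist : (PySem.Str.slice url none (some (PySem.Str.find url "://"))).toList
                = url.toList.take (PySem.Str.find url "://").toNat := by
              rw [PySem.Str.toList_slice, PySem.Chars.slice_eq_listSlice,
                  PySem.List.slice_to _ hnn]
            have noscheme : ∀ (p : String),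
                ¬ PySem.Str.startswith url (p ++ "://") = true →
                ¬ PySem.Str.slice url none (some (PySem.Str.find url "://")) = p := by
              intro p hsw heq
              have htake : url.toList.take (PySem.Str.find url "://").toNat = p.toList := by
                rw [← hheadlist, heq]
              have hpre : (p.toList ++ pvSep) <+: url.toList :=
                pv_prefix_of_head _ _ ((PySem.Str.find url "://").toNat) hocc htake
              apply hsw
              rw [PySem.Str.startswith_eq, PySem.Chars.startswith_iff]
              simpa using hpre
            rw [if_neg]
            intro hor
            rcases hor with h | h | h | h
            · exact noscheme _ (by rw [show ("postgresql+asyncpg" ++ "://" : String) = "postgresql+asyncpg://" from rfl]; exact h1) h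
            · exact noscheme _ (by rw [show ("postgresql+psycopg2" ++ "://" : String) = "postgresql+psycopg2://" from rfl]; exact h2) h
            · exact noscheme _ (by rw [show ("postgresql+psycopg" ++ "://" : String) = "postgresql+psycopg://" from rfl]; exact h3) h
            · exact noscheme _ (by rw [show ("postgres" ++ "://" : String) = "postgres://" from rfl]; exact h4) h
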